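-- pv_equiv track=rewrite | github.com/khelwood/advent-of-code | 2017/17_spinlock.py | fast_spinlock
-- ===== SOURCE A (Python) =====
-- def fast_spinlock(step_size, count):
--     pos = 0
--     size = 1
--     after_zero = 0
--     for value in range(1, count+1):
--         pos = (pos+step_size)%size
--         if pos==0:
--             after_zero = value
--         pos += 1
--         size += 1
--     return after_zero
-- ===== SOURCE B (Python) =====
-- def fast_spinlock(step_size, count):
--     pos, size, after_zero = 0, 1, 0
--     value = 1
--     while value <= count:
--         if step_size >= 1 and size - pos > step_size:
--             # the next (size-pos-1)//step_size insertions cannot wrap past index 0: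
--             # jump over all of them at once
--             k = min((size - pos - 1) // step_size, count - value + 1)
--             value += k
--             pos += k * (step_size + 1)
--             size += k
--         else:
--             p = (pos + step_size) % size
--             after_zero = value if p == 0 else after_zero
--             pos = p + 1
--             size += 1
--             value += 1
--     return after_zero
-- ===== Notes on version B (the rewrite author's own statement) =====
-- stated objective: alternative
-- what changed: Replaces the per-value simulation loop by a jump-ahead while loop that batches all consecutive non-wrapping insertions (which cannot touch position 0) into one arithmetic update clamped to the remaining count; only wrap iterations are simulated individually, so the iteration count drops when step_size is small relative to count.
import Mathlib
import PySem

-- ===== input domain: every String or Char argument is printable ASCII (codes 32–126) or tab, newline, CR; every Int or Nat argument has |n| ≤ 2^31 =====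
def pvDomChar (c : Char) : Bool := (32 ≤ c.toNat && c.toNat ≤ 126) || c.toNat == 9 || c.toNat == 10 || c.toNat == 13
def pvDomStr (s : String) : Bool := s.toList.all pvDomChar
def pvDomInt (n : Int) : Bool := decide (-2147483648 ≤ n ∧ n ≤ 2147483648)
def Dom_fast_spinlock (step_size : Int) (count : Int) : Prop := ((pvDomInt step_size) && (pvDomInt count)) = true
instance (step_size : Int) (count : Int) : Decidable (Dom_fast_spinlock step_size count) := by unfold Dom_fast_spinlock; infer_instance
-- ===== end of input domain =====

-- B replaces A's per-value simulation loop by a jump-ahead loop that batches all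
-- consecutive non-wrapping insertions into one arithmetic update (an alternative
-- algorithm; same value on every input).

-- ===== PORT A =====
-- loop body of A: state (pos, size, after_zero), one iteration for `value`
def spinStep (step_size : Int) (st : Int × Int × Int) (value : Int) : Int × Int × Int :=
  let pos := PySem.Int.mod (st.1 + step_size) st.2.1
  (pos + 1, st.2.1 + 1, if pos = 0 then value else st.2.2)

def fast_spinlock (step_size : Int) (count : Int) : Int :=
  ((PySem.List.pyRange 1 (count + 1) 1).foldl (spinStep step_size) (0, 1, 0)).2.2

-- ===== PORT B =====
-- B's while-loop: state (value, pos, size, after_zero); batch branch jumps k values at once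
def altLoop (step_size count value pos size after_zero : Int) : Int :=
  if hv : value > count then after_zero
  else
    if hc : 1 ≤ step_size ∧ step_size < size - pos then
      let k := min (PySem.Int.floordiv (size - pos - 1) step_size) (count - value + 1)
      altLoop step_size count (value + k) (pos + k * (step_size + 1)) (size + k) after_zero
    else
      let p := PySem.Int.mod (pos + step_size) size
      altLoop step_size count (value + 1) (p + 1) (size + 1)
        (if p = 0 then value else after_zero)
termination_by (count + 1 - value).toNat
decreasing_by
  · have h1 : (1:Int) ≤ PySem.Int.floordiv (size - pos - 1) step_size :=
      (PySem.Int.le_floordiv_iff_mul_le hc.1).mpr (by omega)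
    have h2 : (1:Int) ≤ min (PySem.Int.floordiv (size - pos - 1) step_size) (count - value + 1) :=
      le_min h1 (by omega)
    omega
  · omega

def fast_spinlock_alt (step_size : Int) (count : Int) : Int :=
  altLoop step_size count 1 0 1 0

-- ===== PRECONDITION & SPEC =====
def Spec_fast_spinlock (step_size : Int) (count : Int) (out : Int) : Prop := out = fast_spinlock_alt step_size count
instance (step_size : Int) (count : Int) (out : Int) : Decidable (Spec_fast_spinlock step_size count out) := by unfold Spec_fast_spinlock; infer_instance

-- ===== CLAIM (what is proved, stated in full; the proofs are below) =====
def Claim_equal_fast_spinlock : Prop := ∀ (step_size : Int) (count : Int), Dom_fast_spinlock step_size count → Spec_fast_spinlock step_size count (fast_spinlock step_size count)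

-- ===== LEMMAS AND PROOFS =====

-- k consecutive non-wrapping iterations of A's loop body move the state linearly
lemma batch_lemma (step : Int) (hs : 0 < step) :
    ∀ (j : Nat) (pos size az value : Int), 0 ≤ pos → (j : Int) * step < size - pos →
      (PySem.List.pyRange value (value + j) 1).foldl (spinStep step) (pos, size, az)
        = (pos + j * (step + 1), size + j, az) := by
  intro j
  induction j with
  | zero =>
      intro pos size az value _ _
      rw [show value + ((0:Nat):Int) = value by push_cast; ring, PySem.List.pyRange_one_eq_nil le_rfl]
      simp
  | succ n ih =>
      intro pos size az value hpos hlt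
      have hstep_le : step ≤ ((n:Int) + 1) * step := by nlinarith
      have hlt' : pos + step < size := by push_cast at hlt; omega
      rw [PySem.List.pyRange_one_cons (by push_cast; omega : value < value + ((n:Nat)+1 : Nat))]
      rw [List.foldl_cons]
      have hmod : PySem.Int.mod (pos + step) size = pos + step := by
        rw [PySem.Int.mod_eq_emod_of_pos (by omega)]
        exact Int.emod_eq_of_lt (by omega) hlt'
      have hne : ¬ (pos + step = 0) := by omega
      simp only [spinStep, hmod, if_neg hne]
      have := ih (pos + step + 1) (size + 1) az (value + 1) (by omega)
        (by push_cast at hlt ⊢; nlinarith)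
      have harg : value + ((n:Nat)+1 : Nat) = (value + 1) + (n : Int) := by push_cast; omega
      rw [harg, this]
      simp only [Prod.mk.injEq]
      refine ⟨by push_cast; ring, by push_cast; ring, trivial⟩

lemma loop_eq (step count : Int) (n : Nat) :
    ∀ (value pos size az : Int), (count + 1 - value).toNat ≤ n →
      0 ≤ pos → pos ≤ size → 1 ≤ size →
      altLoop step count value pos size az
        = ((PySem.List.pyRange value (count + 1) 1).foldl (spinStep step) (pos, size, az)).2.2 := by
  induction n with
  | zero =>
      intro value pos size az hn _ _ _
      have hv : value > count := by omega
      rw [altLoop, dif_pos hv, PySem.List.pyRange_one_eq_nil (by omega)]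
      rfl
  | succ m ih =>
      intro value pos size az hn hpos hps hsz
      by_cases hv : value > count
      · rw [altLoop, dif_pos hv, PySem.List.pyRange_one_eq_nil (by omega)]
        rfl
      · rw [altLoop, dif_neg hv]
        by_cases hc : 1 ≤ step ∧ step < size - pos
        · rw [dif_pos hc]
          set k := min (PySem.Int.floordiv (size - pos - 1) step) (count - value + 1) with hk
          have hk1 : (1:Int) ≤ k :=
            le_min ((PySem.Int.le_floordiv_iff_mul_le hc.1).mpr (by omega)) (by omega)
          have hkd : k * step ≤ size - pos - 1 := by
            have h1 : k ≤ PySem.Int.floordiv (size - pos - 1) step := min_le_left _ _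
            exact (PySem.Int.le_floordiv_iff_mul_le hc.1).mp h1
          have hkc : k ≤ count - value + 1 := min_le_right _ _
          have hsplit : PySem.List.pyRange value (count + 1) 1
              = PySem.List.pyRange value (value + k) 1 ++ PySem.List.pyRange (value + k) (count + 1) 1 :=
            PySem.List.pyRange_one_append _ _ _ (by omega) (by omega)
          have hkt : ((k.toNat : Int)) = k := Int.toNat_of_nonneg (by omega)
          have hbatch := batch_lemma step (by omega) k.toNat pos size az value hpos
            (by rw [hkt]; omega)
          rw [hsplit, List.foldl_append]
          rw [hkt] at hbatch
          rw [hbatch]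
          have hmul_nonneg : 0 ≤ k * (step + 1) := by nlinarith
          have := ih (value + k) (pos + k * (step + 1)) (size + k) az
            (by omega) (by omega) (by nlinarith) (by omega)
          rw [this]
        · rw [dif_neg hc]
          rw [PySem.List.pyRange_one_cons (by omega : value < count + 1), List.foldl_cons]
          have hp0 : 0 ≤ PySem.Int.mod (pos + step) size := PySem.Int.mod_nonneg _ (by omega)
          have hp1 : PySem.Int.mod (pos + step) size < size := PySem.Int.mod_lt _ (by omega)
          have := ih (value + 1) (PySem.Int.mod (pos + step) size + 1) (size + 1)
            (if PySem.Int.mod (pos + step) size = 0 then value else az)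
            (by omega) (by omega) (by omega) (by omega)
          rw [this]
          rfl

-- ===== VERDICT (by name: the statement is the Claim_ definition above) =====
theorem fast_spinlock_spec : Claim_equal_fast_spinlock := by
  intro step_size count _
  unfold Spec_fast_spinlock fast_spinlock fast_spinlock_alt
  rw [loop_eq step_size count (count + 1 - 1).toNat 1 0 1 0 (le_refl _)
    (by omega) (by omega) (by omega)]
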